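-- pv_equiv track=rewrite | github.com/Lutakite/YandexTrainings | 3_0/A/34.py | dfs
-- ===== SOURCE A (Python) =====
-- def dfs(graph, visited, now, count, min, heights, visits):
--     visited[now] = True
--     visits += 1
--     for neig in graph[now]:
--         if not visited[neig]:
--             if heights[neig] == min:
--                 count.append((min, neig))
--             count, visits = dfs(graph, visited, neig, count, min, heights, visits)
--     return count, visits
-- ===== SOURCE B (Python) =====
-- def dfs(graph, visited, now, count, min, heights, visits):
--     # Iterative worklist DFS instead of recursion (same return value, same
--     # in-place mutation of visited and count; no recursion-depth limit).
--     visited[now] = True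
--     visits += 1
--     stack = list(graph[now])
--     while stack:
--         node = stack.pop(0)
--         if not visited[node]:
--             if heights[node] == min:
--                 count.append((min, node))
--             visited[node] = True
--             visits += 1
--             stack = list(graph[node]) + stack
--     return count, visits
-- ===== Notes on version B (the rewrite author's own statement) =====
-- stated objective: alternative
-- what changed: Replaces A's recursive DFS by an iterative worklist loop (pop the front node, visit it if unvisited, prepend its neighbour list), so there is no recursion and no recursion-depth limit; same pre-order, same return value and the same in-place mutation of visited and count.
import Mathlib
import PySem

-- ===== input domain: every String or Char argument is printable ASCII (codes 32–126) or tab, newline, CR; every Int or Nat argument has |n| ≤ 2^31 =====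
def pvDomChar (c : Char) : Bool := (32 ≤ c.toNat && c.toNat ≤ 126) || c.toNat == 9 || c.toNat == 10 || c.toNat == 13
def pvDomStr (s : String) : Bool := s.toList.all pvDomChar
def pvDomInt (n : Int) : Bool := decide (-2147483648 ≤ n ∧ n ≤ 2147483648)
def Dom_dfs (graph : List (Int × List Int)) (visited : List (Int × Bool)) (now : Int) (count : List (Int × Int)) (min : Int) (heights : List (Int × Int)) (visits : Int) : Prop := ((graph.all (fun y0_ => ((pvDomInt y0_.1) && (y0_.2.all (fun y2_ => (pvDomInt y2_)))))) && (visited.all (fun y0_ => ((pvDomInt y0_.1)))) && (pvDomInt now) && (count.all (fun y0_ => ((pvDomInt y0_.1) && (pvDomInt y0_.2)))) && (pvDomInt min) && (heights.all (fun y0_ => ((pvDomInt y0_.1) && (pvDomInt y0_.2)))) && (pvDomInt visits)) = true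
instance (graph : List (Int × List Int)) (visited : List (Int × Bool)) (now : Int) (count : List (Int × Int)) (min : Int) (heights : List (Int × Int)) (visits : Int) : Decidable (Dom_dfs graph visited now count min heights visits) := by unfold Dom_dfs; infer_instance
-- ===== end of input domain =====

-- B replaces A's recursive DFS by an iterative worklist loop (equivalence is about the
-- return value; both Pythons mutate the passed-in visited dict and count list identically).

-- number of entries of the visited dict whose value is False (termination measure / fuel bound)
def fcount (d : PySem.Dict Int Bool) : Nat := d.items.countP (fun p => !p.2)

-- the next four lemmas are needed by port B's decreasing_by (fcount_insert_lt)

theorem countP_overwrite_le (l : List (Int × Bool)) (k : Int) :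
    l.countP ((fun p => !p.2) ∘ fun p => if p.1 == k then (k, true) else p)
      ≤ l.countP (fun p => !p.2) := by
  apply List.countP_mono_left
  intro x _ hx
  by_cases hk : (x.1 == k) = true
  · simp [Function.comp, hk] at hx
  · simpa [Function.comp, hk] using hx

theorem countP_overwrite_lt (l : List (Int × Bool)) (k : Int)
    (h : ∃ pr, l.find? (fun p => p.1 == k) = some pr ∧ pr.2 = false) :
    l.countP ((fun p => !p.2) ∘ fun p => if p.1 == k then (k, true) else p)
      < l.countP (fun p => !p.2) := by
  obtain ⟨pr, hf, hsnd⟩ := h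
  induction l with
  | nil => simp at hf
  | cons p t ih =>
      cases hp : (p.1 == k) with
      | true =>
        simp only [List.find?_cons, hp, Option.some.injEq] at hf
        subst hf
        have hle := countP_overwrite_le t k
        have hhead : ((fun q => !q.2) ∘ fun q => if q.1 == k then (k, true) else q) p = false := by
          simp [Function.comp, hp]
        have h2 : (!p.2) = true := by rw [hsnd]; rfl
        rw [List.countP_cons, List.countP_cons, hhead, h2,
          if_neg Bool.false_ne_true, if_pos rfl]
        omega
      | false =>
        simp only [List.find?_cons, hp] at hf
        have := ih hf
        have hhead : ((fun q => !q.2) ∘ fun q => if q.1 == k then (k, true) else q) p = !p.2 := by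
          simp [Function.comp, hp]
        rw [List.countP_cons, List.countP_cons, hhead]
        exact Nat.add_lt_add_right this _

theorem get?_find_false {d : PySem.Dict Int Bool} {k : Int}
    (h : PySem.Dict.get? d k = some false) :
    ∃ pr, d.items.find? (fun p => p.1 == k) = some pr ∧ pr.2 = false := by
  unfold PySem.Dict.get? at h
  cases hf : d.items.find? (fun p => p.1 == k) with
  | none => simp [hf] at h
  | some pr => exact ⟨pr, rfl, by simp [hf] at h; exact h⟩

theorem fcount_insert_lt {d : PySem.Dict Int Bool} {k : Int}
    (h : PySem.Dict.get? d k = some false) :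
    fcount (PySem.Dict.insert d k true) < fcount d := by
  have hcont : PySem.Dict.contains d k = true := by
    rw [PySem.Dict.contains_eq_isSome_get?, h]; rfl
  unfold fcount PySem.Dict.insert
  rw [if_pos hcont, List.countP_map]
  exact countP_overwrite_lt d.items k (get?_find_false h)

-- ===== PORT A =====
-- A's for-loop over graph[now] with the recursive call dfs(…, neig, …) inlined
-- (the call marks neig, increments visits and loops over graph[neig]); the Nat
-- argument is a fuel guard making the nested recursion total — the fuel passed
-- by `dfs` below is proved large enough to never run out.
def loopA (g : PySem.Dict Int (List Int)) (hts : PySem.Dict Int Int) (mn : Int) :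
    Nat → PySem.Dict Int Bool → List Int → List (Int × Int) → Int →
    PySem.Dict Int Bool × List (Int × Int) × Int
  | _, v, [], c, vis => (v, c, vis)
  | 0, v, _ :: _, c, vis => (v, c, vis)   -- fuel guard, unreachable from `dfs`
  | f+1, v, n :: ns, c, vis =>
      if PySem.Dict.get? v n = some false then
        let c1 := if PySem.Dict.get? hts n = some mn then c ++ [(mn, n)] else c
        let r := loopA g hts mn f (PySem.Dict.insert v n true) (PySem.Dict.getD g n []) c1 (vis + 1)
        loopA g hts mn (f+1) r.1 ns r.2.1 r.2.2
      else loopA g hts mn (f+1) v ns c vis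
  termination_by f _ l _ _ => (f, l.length)

def dfs (graph : List (Int × List Int)) (visited : List (Int × Bool)) (now : Int) (count : List (Int × Int)) (min : Int) (heights : List (Int × Int)) (visits : Int) : (List (Int × Int)) × Int :=
  let g := PySem.Dict.mk graph
  let v0 := PySem.Dict.mk visited
  let v1 := PySem.Dict.insert v0 now true          -- visited[now] = True
  let r := loopA g (PySem.Dict.mk heights) min (visited.length + 2) v1
             (PySem.Dict.getD g now []) count (visits + 1)
  (r.2.1, r.2.2)

-- ===== PORT B =====
-- B's while-loop: pop the front of the worklist, visit if unvisited, prepend its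
-- neighbour list; terminates by (false entries of visited, worklist length).
def loopB (g : PySem.Dict Int (List Int)) (hts : PySem.Dict Int Int) (mn : Int) :
    PySem.Dict Int Bool → List (Int × Int) → Int → List Int →
    PySem.Dict Int Bool × List (Int × Int) × Int
  | v, c, vis, [] => (v, c, vis)
  | v, c, vis, n :: s =>
      if PySem.Dict.get? v n = some false then
        let c1 := if PySem.Dict.get? hts n = some mn then c ++ [(mn, n)] else c
        loopB g hts mn (PySem.Dict.insert v n true) c1 (vis + 1) (PySem.Dict.getD g n [] ++ s)
      else loopB g hts mn v c vis s
  termination_by v _ _ s => (fcount v, s.length)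
  decreasing_by
    · exact Prod.Lex.left _ _ (fcount_insert_lt (by assumption))
    · exact Prod.Lex.right _ (Nat.lt_succ_self _)

def dfs_alt (graph : List (Int × List Int)) (visited : List (Int × Bool)) (now : Int) (count : List (Int × Int)) (min : Int) (heights : List (Int × Int)) (visits : Int) : (List (Int × Int)) × Int :=
  let g := PySem.Dict.mk graph
  let v1 := PySem.Dict.insert (PySem.Dict.mk visited) now true   -- visited[now] = True
  let r := loopB g (PySem.Dict.mk heights) min v1 count (visits + 1) (PySem.Dict.getD g now [])
  (r.2.1, r.2.2)

-- ===== PRECONDITION & SPEC =====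
-- Helpers for Pre_: bounded reachability closure describing which nodes the traversal
-- can reach and which dict entries it therefore reads (a static graph-reachability
-- condition on the input, independent of count/visits and of the traversal order).
def pvExpandable (visited : List (Int × Bool)) (now m : Int) : Bool :=
  m == now || PySem.Dict.get? (PySem.Dict.mk visited) m == some false

def pvReachGo (graph : List (Int × List Int)) (visited : List (Int × Bool)) (now : Int) : Nat → List Int → List Int
  | 0, s => s
  | k+1, s => pvReachGo graph visited now k
      ((s ++ (s.filter (pvExpandable visited now)).flatMap
          (fun m => PySem.Dict.getD (PySem.Dict.mk graph) m [])).dedup)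

-- all neighbours of reachable expandable nodes: exactly the keys whose visited entry A reads
def pvTouchedNodes (graph : List (Int × List Int)) (visited : List (Int × Bool)) (now : Int) : List Int :=
  let r := pvReachGo graph visited now (graph.length + visited.length + 1) [now]
  (r.filter (pvExpandable visited now)).flatMap (fun m => PySem.Dict.getD (PySem.Dict.mk graph) m [])

-- Exactly the inputs on which the Python raises no KeyError: now is a key of graph, and
-- every node the traversal reaches has the visited entry it reads and, when that entry is
-- False, the graph and heights entries it then reads (n = now needs none: it is marked first).
def Pre_dfs (graph : List (Int × List Int)) (visited : List (Int × Bool)) (now : Int) (count : List (Int × Int)) (min : Int) (heights : List (Int × Int)) (visits : Int) : Prop :=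
  (PySem.Dict.contains (PySem.Dict.mk graph) now = true) ∧
  ∀ n ∈ pvTouchedNodes graph visited now, n ≠ now →
    (PySem.Dict.get? (PySem.Dict.mk visited) n = some true ∨
     (PySem.Dict.get? (PySem.Dict.mk visited) n = some false ∧
      PySem.Dict.contains (PySem.Dict.mk graph) n = true ∧
      PySem.Dict.contains (PySem.Dict.mk heights) n = true))
instance (graph : List (Int × List Int)) (visited : List (Int × Bool)) (now : Int) (count : List (Int × Int)) (min : Int) (heights : List (Int × Int)) (visits : Int) : Decidable (Pre_dfs graph visited now count min heights visits) := by unfold Pre_dfs; infer_instance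

def pvWitness_dfs : (List (Int × List Int)) × (List (Int × Bool)) × Int × (List (Int × Int)) × Int × (List (Int × Int)) × Int :=
  ([(0, [1, 2]), (1, [2]), (2, [])], [(1, false), (2, false)], 0, [], 5, [(1, 5), (2, 7)], 0)

def Spec_dfs (graph : List (Int × List Int)) (visited : List (Int × Bool)) (now : Int) (count : List (Int × Int)) (min : Int) (heights : List (Int × Int)) (visits : Int) (out : (List (Int × Int)) × Int) : Prop := out = dfs_alt graph visited now count min heights visits
instance (graph : List (Int × List Int)) (visited : List (Int × Bool)) (now : Int) (count : List (Int × Int)) (min : Int) (heights : List (Int × Int)) (visits : Int) (out : (List (Int × Int)) × Int) : Decidable (Spec_dfs graph visited now count min heights visits out) := by unfold Spec_dfs; infer_instance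

-- ===== CLAIM (what is proved, stated in full; the proofs are below) =====
def Claim_equal_dfs : Prop := ∀ (graph : List (Int × List Int)) (visited : List (Int × Bool)) (now : Int) (count : List (Int × Int)) (min : Int) (heights : List (Int × Int)) (visits : Int), Dom_dfs graph visited now count min heights visits → Pre_dfs graph visited now count min heights visits → Spec_dfs graph visited now count min heights visits (dfs graph visited now count min heights visits)

-- ===== LEMMAS AND PROOFS =====

theorem fcount_insert_le (d : PySem.Dict Int Bool) (k : Int) :
    fcount (PySem.Dict.insert d k true) ≤ fcount d := by
  unfold fcount PySem.Dict.insert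
  split
  · rw [List.countP_map]; exact countP_overwrite_le d.items k
  · simp [List.countP_append]

theorem fcount_pos {d : PySem.Dict Int Bool} {k : Int}
    (h : PySem.Dict.get? d k = some false) : 1 ≤ fcount d := by
  obtain ⟨pr, hf, hsnd⟩ := get?_find_false h
  have hmem := List.mem_of_find?_eq_some hf
  have : 0 < d.items.countP (fun p => !p.2) :=
    List.countP_pos_iff.mpr ⟨pr, hmem, by simp [hsnd]⟩
  simpa [fcount] using this

-- loopA never creates a False entry in visited
theorem loopA_fcount (g : PySem.Dict Int (List Int)) (hts : PySem.Dict Int Int) (mn : Int) :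
    ∀ fuel l v c vis, fcount (loopA g hts mn fuel v l c vis).1 ≤ fcount v := by
  intro fuel
  induction fuel using Nat.strong_induction_on with
  | _ fuel IH =>
    intro l
    induction l with
    | nil => intro v c vis; cases fuel <;> simp [loopA]
    | cons n ns ihl =>
      intro v c vis
      cases fuel with
      | zero => simp [loopA]
      | succ f =>
        by_cases hv : PySem.Dict.get? v n = some false
        · rw [loopA, if_pos hv]
          dsimp only
          have h1 := IH f (Nat.lt_succ_self f) (PySem.Dict.getD g n [])
            (PySem.Dict.insert v n true)
            (if PySem.Dict.get? hts n = some mn then c ++ [(mn, n)] else c) (vis + 1)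
          have h2 := ihl (loopA g hts mn f (PySem.Dict.insert v n true) (PySem.Dict.getD g n [])
            (if PySem.Dict.get? hts n = some mn then c ++ [(mn, n)] else c) (vis + 1)).1
            (loopA g hts mn f (PySem.Dict.insert v n true) (PySem.Dict.getD g n [])
            (if PySem.Dict.get? hts n = some mn then c ++ [(mn, n)] else c) (vis + 1)).2.1
            (loopA g hts mn f (PySem.Dict.insert v n true) (PySem.Dict.getD g n [])
            (if PySem.Dict.get? hts n = some mn then c ++ [(mn, n)] else c) (vis + 1)).2.2
          have h3 := fcount_insert_le v n
          omega
        · rw [loopA, if_neg hv]; exact ihl v c vis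

-- the simulation: running A's loop on l and then B's loop on s equals B's loop on l ++ s
theorem loopA_loopB (g : PySem.Dict Int (List Int)) (hts : PySem.Dict Int Int) (mn : Int) :
    ∀ fuel l v c vis s, fcount v < fuel →
      loopB g hts mn (loopA g hts mn fuel v l c vis).1 (loopA g hts mn fuel v l c vis).2.1
        (loopA g hts mn fuel v l c vis).2.2 s
      = loopB g hts mn v c vis (l ++ s) := by
  intro fuel
  induction fuel using Nat.strong_induction_on with
  | _ fuel IH =>
    intro l
    induction l with
    | nil => intro v c vis s _; cases fuel <;> simp [loopA]
    | cons n ns ihl =>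
      intro v c vis s hfc
      obtain ⟨f, rfl⟩ : ∃ f, fuel = f + 1 := ⟨fuel - 1, by omega⟩
      by_cases hv : PySem.Dict.get? v n = some false
      · have h1 : 1 ≤ fcount v := fcount_pos hv
        have hlt : fcount (PySem.Dict.insert v n true) < fcount v := fcount_insert_lt hv
        rw [loopA, if_pos hv]
        dsimp only
        generalize hc1 : (if PySem.Dict.get? hts n = some mn then c ++ [(mn, n)] else c) = c1
        generalize hr : loopA g hts mn f (PySem.Dict.insert v n true) (PySem.Dict.getD g n []) c1 (vis + 1) = r
        have hrfc : fcount r.1 < f + 1 := by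
          have := loopA_fcount g hts mn f (PySem.Dict.getD g n [])
            (PySem.Dict.insert v n true) c1 (vis + 1)
          rw [hr] at this; omega
        rw [ihl r.1 r.2.1 r.2.2 s hrfc]
        have hstep := IH f (Nat.lt_succ_self f) (PySem.Dict.getD g n [])
          (PySem.Dict.insert v n true) c1 (vis + 1) (ns ++ s) (by omega)
        rw [hr] at hstep
        rw [hstep]
        rw [List.cons_append, loopB, if_pos hv, hc1]
      · rw [loopA, if_neg hv, ihl v c vis s hfc, List.cons_append, loopB, if_neg hv]

theorem fcount_le_len (visited : List (Int × Bool)) (now : Int) :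
    fcount (PySem.Dict.insert (PySem.Dict.mk visited) now true) < visited.length + 2 := by
  have h1 := fcount_insert_le (PySem.Dict.mk visited) now
  have h2 : fcount (PySem.Dict.mk visited) ≤ visited.length := by
    unfold fcount; exact List.countP_le_length
  omega

-- ===== VERDICT (by name: the statement is the Claim_ definition above) =====
theorem dfs_spec : Claim_equal_dfs := by
  intro graph visited now count min heights visits _ _
  unfold Spec_dfs dfs dfs_alt
  dsimp only
  have h := loopA_loopB (PySem.Dict.mk graph) (PySem.Dict.mk heights) min
    (visited.length + 2) (PySem.Dict.getD (PySem.Dict.mk graph) now [])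
    (PySem.Dict.insert (PySem.Dict.mk visited) now true) count (visits + 1) []
    (fcount_le_len visited now)
  rw [loopB, List.append_nil] at h
  rw [← h]
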